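-- pv_equiv track=rewrite | github.com/hkjeon13/gemeinschaft | app/services/conversation_store.py | _title_from_messages
-- ===== SOURCE A (Python) =====
-- from typing import Any, Dict, List, Optional
--
-- _TITLE_MAX_LENGTH = 120
--
-- def _normalize_title(value: Any) -> Optional[str]:
--     if value is None:
--         return None
--     text = " ".join(str(value).split()).strip()
--     if not text:
--         return None
--     return text[:_TITLE_MAX_LENGTH]
--
-- def _title_from_messages(messages: List[Dict[str, Any]]) -> Optional[str]:
--     for item in messages:
--         role = str(item.get("role", "")).strip().lower()
--         if role != "user":
--             continue
--         candidate = _normalize_title(item.get("message"))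
--         if candidate:
--             return candidate
--
--     for item in messages:
--         candidate = _normalize_title(item.get("message"))
--         if candidate:
--             return candidate
--     return None
-- ===== SOURCE B (Python) =====
-- _TITLE_MAX_LENGTH = 120
--
--
-- def _normalize_title(value):
--     if value is None:
--         return None
--     text = " ".join(str(value).split()).strip()
--     if not text:
--         return None
--     return text[:_TITLE_MAX_LENGTH]
--
--
-- def _title_from_messages(messages):
--     # Single pass: return the first user message's title eagerly; remember the
--     # first normalizable message of any role as a fallback.
--     fallback = None
--     for item in messages:
--         candidate = _normalize_title(item.get("message"))
--         if not candidate: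
--             continue
--         if str(item.get("role", "")).strip().lower() == "user":
--             return candidate
--         if fallback is None:
--             fallback = candidate
--     return fallback
-- ===== Notes on version B (the rewrite author's own statement) =====
-- stated objective: simpler
-- what changed: Replaces A's two separate scans (user-only pass, then any-message pass) with a single pass that returns eagerly on the first user message with a title and keeps the first normalizable message of any role as a fallback accumulator.
import Mathlib
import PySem

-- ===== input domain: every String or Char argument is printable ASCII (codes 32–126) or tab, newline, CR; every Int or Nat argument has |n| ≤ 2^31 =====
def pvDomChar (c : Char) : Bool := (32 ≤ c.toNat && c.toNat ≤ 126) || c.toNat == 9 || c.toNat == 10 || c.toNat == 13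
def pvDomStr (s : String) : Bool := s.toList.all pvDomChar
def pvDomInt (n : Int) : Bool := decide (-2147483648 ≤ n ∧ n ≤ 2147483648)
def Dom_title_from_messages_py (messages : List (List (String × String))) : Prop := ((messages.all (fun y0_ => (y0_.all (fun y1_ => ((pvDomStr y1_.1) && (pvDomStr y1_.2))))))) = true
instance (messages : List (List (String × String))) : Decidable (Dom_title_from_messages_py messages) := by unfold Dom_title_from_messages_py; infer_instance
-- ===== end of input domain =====

-- B merges A's two scans into one pass that returns eagerly on the first user
-- message and keeps the first normalizable message as a fallback (objective: simpler).

-- ===== PORT A =====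
-- dict.get(k) on the association list (first match, Python dict semantics)
def pvGet (item : List (String × String)) (k : String) : Option String :=
  (PySem.Dict.mk item).get? k

-- _normalize_title (shared helper of Source A and Source B, ported once)
def pvNormalizeTitle (v : Option String) : Option String :=
  match v with
  | none => none
  | some s =>
      let text := PySem.Str.strip (PySem.Str.join " " (PySem.Str.split₀ s))
      if text = "" then none
      else some (PySem.Str.slice text none (some 120))

-- first loop of A: first user message with a truthy candidate
def pvLoopUser : List (List (String × String)) → Option String
  | [] => none
  | item :: rest =>
      let role := PySem.Str.lower (PySem.Str.strip ((pvGet item "role").getD ""))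
      if role ≠ "user" then pvLoopUser rest
      else
        match pvNormalizeTitle (pvGet item "message") with
        | some c => if c ≠ "" then some c else pvLoopUser rest
        | none => pvLoopUser rest

-- second loop of A: first truthy candidate of any message
def pvLoopAny : List (List (String × String)) → Option String
  | [] => none
  | item :: rest =>
      match pvNormalizeTitle (pvGet item "message") with
      | some c => if c ≠ "" then some c else pvLoopAny rest
      | none => pvLoopAny rest

def title_from_messages_py (messages : List (List (String × String))) : Option String :=
  match pvLoopUser messages with
  | some c => some c
  | none => pvLoopAny messages

-- ===== PORT B =====
-- single pass with a fallback accumulator (Source B's loop)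
def pvLoopB : List (List (String × String)) → Option String → Option String
  | [], fallback => fallback
  | item :: rest, fallback =>
      match pvNormalizeTitle (pvGet item "message") with
      | none => pvLoopB rest fallback
      | some c =>
          if c = "" then pvLoopB rest fallback
          else if PySem.Str.lower (PySem.Str.strip ((pvGet item "role").getD "")) = "user" then
            some c
          else
            match fallback with
            | none => pvLoopB rest (some c)
            | some f => pvLoopB rest (some f)

def title_from_messages_py_alt (messages : List (List (String × String))) : Option String :=
  pvLoopB messages none

-- ===== PRECONDITION & SPEC =====
def Spec_title_from_messages_py (messages : List (List (String × String))) (out : Option String) : Prop := out = title_from_messages_py_alt messages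
instance (messages : List (List (String × String))) (out : Option String) : Decidable (Spec_title_from_messages_py messages out) := by unfold Spec_title_from_messages_py; infer_instance

-- ===== CLAIM (what is proved, stated in full; the proofs are below) =====
def Claim_equal_title_from_messages_py : Prop := ∀ (messages : List (List (String × String))), Dom_title_from_messages_py messages → Spec_title_from_messages_py messages (title_from_messages_py messages)

-- ===== LEMMAS AND PROOFS =====

-- loop invariant: B's pass computes user-hit, else fallback, else A's any-scan
theorem pvLoopB_eq (ms : List (List (String × String))) :
    ∀ fb, pvLoopB ms fb = ((pvLoopUser ms).or (fb.or (pvLoopAny ms))) := by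
  induction ms with
  | nil => intro fb; cases fb <;> simp [pvLoopB, pvLoopUser, pvLoopAny]
  | cons item rest ih =>
      intro fb
      simp only [pvLoopB, pvLoopUser, pvLoopAny]
      cases hn : pvNormalizeTitle (pvGet item "message") with
      | none =>
          by_cases hr : PySem.Str.lower (PySem.Str.strip ((pvGet item "role").getD "")) = "user" <;>
            simp [hr, ih fb]
      | some c =>
          by_cases hc : c = ""
          · by_cases hr : PySem.Str.lower (PySem.Str.strip ((pvGet item "role").getD "")) = "user" <;>
              simp [hr, hc, ih fb]
          · by_cases hr : PySem.Str.lower (PySem.Str.strip ((pvGet item "role").getD "")) = "user"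
            · simp [hr, hc]
            · cases fb with
              | none => simp [hr, hc, ih (some c)]
              | some f => simp [hr, hc, ih (some f)]

-- ===== VERDICT (by name: the statement is the Claim_ definition above) =====
theorem title_from_messages_py_spec : Claim_equal_title_from_messages_py := by
  intro messages _
  unfold Spec_title_from_messages_py title_from_messages_py title_from_messages_py_alt
  rw [pvLoopB_eq]
  cases h : pvLoopUser messages <;> simp
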